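/- GENERATED by mk_final_copies.py from the proof of the farm's unit `start_decoder.F6b` (farm:start_decoder.F6b.1: Proof.lean) as the
   re-elaboration sweep compiled it — do not edit. -/
/-
  UNIT `start_decoder.F6b`: ONE ROUND of loop 4015 (`for (j = 0; j < g->values; ++j) { p[j].x = g->Xlist[j]; p[j].id = j; }`,
  0x115768 – 0x11577d + 0x11571b – 0x115764), or its exit arm 0x11577f – 0x115799 (`qsort(p, g->values, 4, point_compare)`, `j = 0`).
  The two walks are lemmas of Lemmas.lean (`walk_loop1_body`, `walk_exit`); here the case split on the `jg` of 0x11577d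
  (`j < values` or `values ≤ j`), qsort's premise `CmpSpec … point_compare 4` from point_compare's contract, and the repacking
  of the lemmas' `St` / `Inv1` / `Inv2` into the tree's `AtF6P` / `AtF6Q`.
-/
import Asan.CheckWalk
import Vorbis.Spec.LibcSortBridge
import Vorbis.Spec.Units.start_decoder_F6b
import Vorbis.Spec.Worked.start_decoder_F6b_Lemmas

open X86 X86.User Asan Vorbis Vorbis.Spec Vorbis.Spec.StartDecoder

set_option maxRecDepth 4000
set_option maxHeartbeats 4000000

namespace Vorbis.Spec.start_decoder_F6b

/-- **qsort's premise at this call site**: `point_compare` is a comparison function for records of 4 bytes. Its precondition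
is literally `cmpSpec`'s with `w = 4` (two live records), its post contains `ShadowUntouched`, its frame is 48 bytes and it has
no window; its address is a label of the image (below 1 GB). -/
theorem cmp_point_compare {Lay : Layout} {μ : Microarch} {u₀ : State} (others : List Obj)
    (frames : List (Nat × FrameLayout))
    (hpc : Calls Lay μ Vorbis.WayInv (Vorbis.conv u₀) Vorbis.L.point_compare.entry
      (Vorbis.Spec.point_compare.spec others frames)) :
    CmpSpec Lay μ u₀ others frames Vorbis.L.point_compare.entry 4 := by
  refine CmpSpec.of_calls (by decide) hpc ?_ ?_ ?_ ?_
  · -- the precondition: the same three clauses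
    intro u hu
    exact hu
  · -- the post: its first conjunct
    intro u w _ hpost
    exact hpost.1
  · -- the frame
    rw [point_compare.spec_frame]
    exact Nat.le_refl _
  · -- no window
    intro u
    exact point_compare.spec_writes others frames u

end Vorbis.Spec.start_decoder_F6b

theorem Vorbis.Spec.Worked.start_decoder_F6b_ok : Vorbis.Spec.start_decoder_F6b.Statement := by
  intro Lay hLay μ hμ u₀ hcode hload2 hstore2 hload4 h_qsort h_point_compare g i v hat
  obtain ⟨A5, A, mc, n, j, hv, hr12, hj, hfill⟩ := hat
  -- the contract of `qsort` for this call site: the comparison function is `point_compare`, the records are 4 bytes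
  have hcmp := Vorbis.Spec.start_decoder_F6b.cmp_point_compare A.2 g.frames' (h_point_compare A.2 g.frames')
  have hq := h_qsort A.2 g.frames' Vorbis.L.point_compare.entry 4 hcmp
  have hst := Vorbis.Spec.start_decoder_F6b.St.of_inF6 hv
  by_cases hlt : (j : Int) < Floor1.values v.mem (floorAt g v.mem i)
  · -- 0x11577d `jg 11571b` taken (`j < values`): one round, back at the head 0x115768 with `j + 1`
    refine (Vorbis.Spec.start_decoder_F6b.walk_loop1_body Lay hLay μ hμ u₀ hcode hload2 hstore2 hload4 g i A5 A mc n hq v j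
      hst hr12 hlt hfill).mono ?_
    intro w hw
    obtain ⟨⟨j', hst', e12, hj', hfill'⟩, hmeasure⟩ := hw
    exact Or.inl ⟨⟨A5, A, mc, n, j', hst'.inF6, e12, hj', hfill'⟩, hmeasure⟩
  · -- 0x11577d not taken (`values ≤ j`): qsort, `j = 0`, the head 0x11579e of loop 4020
    refine (Vorbis.Spec.start_decoder_F6b.walk_exit Lay hLay μ hμ u₀ hcode hload2 hstore2 hload4 g i A5 A mc n hq v j
      hst hr12 hj (by omega) hfill).mono ?_
    intro w hw
    obtain ⟨j', hst', e12, hj', hpid⟩ := hw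
    exact Or.inr ⟨A5, A, mc, n, j', hst'.inF6, e12, hj', hpid⟩
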